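-- pv_equiv track=rewrite | github.com/MelyNik/Python_S_L | D_Z/Seminar_9_2/bot.py | show_field
-- ===== SOURCE A (Python) =====
-- def show_field(field):
--     txt = ''
--     for i in range(len(field)):
--         if not i % 3:
--             txt += f'\n{"-" * 25}\n'
--         txt += f'{field[i]:^8}'
--     txt += f"\n{'_' * 25}"
--     return txt
-- ===== SOURCE B (Python) =====
-- def show_field(field):
--     sep = '\n' + '-' * 25 + '\n'
--     rows = (sep + ''.join(f'{c:^8}' for c in field[i:i + 3])
--             for i in range(0, len(field), 3))
--     return ''.join(rows) + '\n' + '_' * 25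
-- ===== Notes on version B (the rewrite author's own statement) =====
-- stated objective: alternative
-- what changed: B replaces A's flat index loop with an i%3 test by slicing the field into rows of three and joining each row's centered cells, so the separator placement is structural (one per row) instead of modulo-derived.
import Mathlib
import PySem

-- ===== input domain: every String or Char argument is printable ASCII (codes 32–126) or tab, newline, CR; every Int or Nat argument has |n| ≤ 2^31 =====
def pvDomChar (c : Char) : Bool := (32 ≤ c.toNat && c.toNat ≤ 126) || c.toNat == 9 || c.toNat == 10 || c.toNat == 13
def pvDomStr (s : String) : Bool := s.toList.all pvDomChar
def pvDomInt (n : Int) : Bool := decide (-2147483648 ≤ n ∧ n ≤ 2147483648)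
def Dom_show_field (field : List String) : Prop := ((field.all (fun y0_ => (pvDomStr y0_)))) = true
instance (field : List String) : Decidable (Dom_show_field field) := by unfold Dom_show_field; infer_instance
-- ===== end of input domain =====

-- B changes only the decomposition (rows of three instead of a flat i%3 loop); return values are identical.
-- Strings under construction are modelled as List Char (kernel-transparent), wrapped with String.ofList at the end.

-- ===== PORT A =====
-- f'\n{"-" * 25}\n'
def sepC : List Char := ['\n'] ++ List.replicate 25 '-' ++ ['\n']
-- f"\n{'_' * 25}"
def footC : List Char := ['\n'] ++ List.replicate 25 '_'
-- f'{s:^8}' : center in width 8, extra space on the right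
def center8 (s : String) : List Char :=
  let cs := s.toList
  if 8 ≤ cs.length then cs
  else
    let pad := 8 - cs.length
    List.replicate (pad / 2) ' ' ++ cs ++ List.replicate (pad - pad / 2) ' '

def show_field (field : List String) : String :=
  let txt := (PySem.List.pyRange 0 (field.length : Int) 1).foldl
    (fun txt i =>
      (if PySem.Int.mod i 3 == 0 then txt ++ sepC else txt)
        ++ center8 (PySem.List.pyGetD field i ""))
    ([] : List Char)
  String.ofList (txt ++ footC)

-- ===== PORT B =====
-- ''.join
def joinC : List (List Char) → List Char
  | [] => []
  | x :: xs => x ++ joinC xs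

-- one entry per slice field[i:i+3]: the separator plus the joined centered cells
def rowsB : List String → List (List Char)
  | [] => []
  | [a] => [sepC ++ joinC [center8 a]]
  | [a, b] => [sepC ++ joinC [center8 a, center8 b]]
  | a :: b :: c :: rest => (sepC ++ joinC [center8 a, center8 b, center8 c]) :: rowsB rest

def show_field_alt (field : List String) : String :=
  String.ofList (joinC (rowsB field) ++ footC)

-- ===== PRECONDITION & SPEC =====
def Spec_show_field (field : List String) (out : String) : Prop := out = show_field_alt field
instance (field : List String) (out : String) : Decidable (Spec_show_field field out) := by unfold Spec_show_field; infer_instance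

-- ===== CLAIM (what is proved, stated in full; the proofs are below) =====
def Claim_equal_show_field : Prop := ∀ (field : List String), Dom_show_field field → Spec_show_field field (show_field field)

-- ===== LEMMAS AND PROOFS =====

-- A's loop body, with the index/value pair made explicit
def bodyA (txt : List Char) (p : Int × String) : List Char :=
  (if PySem.Int.mod p.1 3 == 0 then txt ++ sepC else txt) ++ center8 p.2

lemma not_dvd3_add2 (k : Nat) : ¬ (3 : Int) ∣ 3 * (k : Int) + 1 + 1 := by omega

lemma foldA_rows (xs : List String) (k : Nat) (acc : List Char) :
    (PySem.List.enumerate xs (3 * (k : Int))).foldl bodyA acc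
      = acc ++ joinC (rowsB xs) := by
  induction xs using rowsB.induct generalizing k acc with
  | case1 => simp [PySem.List.enumerate_nil, rowsB, joinC]
  | case2 a =>
      simp [PySem.List.enumerate_cons, PySem.List.enumerate_nil, rowsB, joinC,
            bodyA, List.append_assoc]
  | case3 a b =>
      simp [PySem.List.enumerate_cons, PySem.List.enumerate_nil, rowsB, joinC,
            bodyA, List.append_assoc]
  | case4 a b c rest ih =>
      have hnext : (3 * (k : Int) + 1 + 1 + 1) = 3 * ((k + 1 : Nat) : Int) := by
        push_cast; ring
      simp only [PySem.List.enumerate_cons, List.foldl_cons, hnext, ih (k + 1)]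
      simp [rowsB, joinC, bodyA, not_dvd3_add2 k, List.append_assoc]

-- ===== VERDICT (by name: the statement is the Claim_ definition above) =====
theorem show_field_spec : Claim_equal_show_field := by
  intro field _
  unfold Spec_show_field show_field show_field_alt
  have hmap := PySem.List.enumerate_eq_map_pyRange (xs := field) (d := "")
  have : (PySem.List.pyRange 0 (field.length : Int) 1).foldl
      (fun txt i =>
        (if PySem.Int.mod i 3 == 0 then txt ++ sepC else txt)
          ++ center8 (PySem.List.pyGetD field i "")) ([] : List Char)
      = (PySem.List.enumerate field 0).foldl bodyA [] := by
    rw [hmap, List.foldl_map]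
    rfl
  rw [this]
  have h0 : (0 : Int) = 3 * ((0 : Nat) : Int) := by norm_num
  rw [h0, foldA_rows field 0 []]
  simp
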